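-- pv_equiv track=rewrite | github.com/Posvian/python_basics | lesson_05/task_5_02_02.py | iterator_with_yield
-- ===== SOURCE A (Python) =====
-- def iterator_with_yield(n):
--     num = 1
--     num_sum = 0
--     while num <= n:
--         if num**2 < 200:
--             num_sum += num
--             yield num, num_sum
--         num += 2
-- ===== SOURCE B (Python) =====
-- def iterator_with_yield(n):
--     # Only odd numbers up to 13 can satisfy num**2 < 200, and the running
--     # sum of the first k odd numbers is k**2, so compute it in closed form.
--     top = n if n < 13 else 13
--     for num in range(1, top + 1, 2):
--         yield num, ((num + 1) // 2) ** 2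
-- ===== Notes on version B (the rewrite author's own statement) =====
-- stated objective: faster
-- what changed: Replaces the unbounded while-loop with its running-sum accumulator by a bounded range over the odd numbers up to min(n, 13) with the sum computed in closed form as ((num+1)//2)**2 (sum of first k odds = k^2).
import Mathlib
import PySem

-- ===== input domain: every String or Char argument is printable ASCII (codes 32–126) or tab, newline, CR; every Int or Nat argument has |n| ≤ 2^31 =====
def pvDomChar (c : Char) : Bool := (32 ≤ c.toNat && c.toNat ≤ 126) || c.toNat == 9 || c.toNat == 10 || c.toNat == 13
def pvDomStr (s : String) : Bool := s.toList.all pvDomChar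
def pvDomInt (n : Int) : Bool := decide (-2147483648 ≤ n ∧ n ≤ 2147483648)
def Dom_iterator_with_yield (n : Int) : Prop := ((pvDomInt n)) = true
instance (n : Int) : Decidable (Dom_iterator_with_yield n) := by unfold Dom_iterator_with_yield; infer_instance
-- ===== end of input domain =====

-- B replaces A's unbounded while-loop and running-sum accumulator by a bounded
-- range over the odd numbers up to min(n, 13) with the sum in closed form (faster).

-- ===== PORT A =====
-- while num <= n: if num**2 < 200: num_sum += num; yield (num, num_sum); num += 2
def iteratorWithYieldLoopA (n num num_sum : Int) : List (Int × Int) :=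
  if num ≤ n then
    if num ^ 2 < 200 then
      (num, num_sum + num) :: iteratorWithYieldLoopA n (num + 2) (num_sum + num)
    else
      iteratorWithYieldLoopA n (num + 2) num_sum
  else []
termination_by (n + 1 - num).toNat
decreasing_by all_goals omega

def iterator_with_yield (n : Int) : List (Int × Int) :=
  iteratorWithYieldLoopA n 1 0

-- ===== PORT B =====
def iterator_with_yield_alt (n : Int) : List (Int × Int) :=
  (PySem.List.pyRange 1 ((if n < 13 then n else 13) + 1) 2).map
    (fun num => (num, (PySem.Int.floordiv (num + 1) 2) ^ 2))

-- ===== PRECONDITION & SPEC =====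
def Spec_iterator_with_yield (n : Int) (out : List (Int × Int)) : Prop := out = iterator_with_yield_alt n
instance (n : Int) (out : List (Int × Int)) : Decidable (Spec_iterator_with_yield n out) := by unfold Spec_iterator_with_yield; infer_instance

-- ===== CLAIM (what is proved, stated in full; the proofs are below) =====
def Claim_equal_iterator_with_yield : Prop := ∀ (n : Int), Dom_iterator_with_yield n → Spec_iterator_with_yield n (iterator_with_yield n)

-- ===== LEMMAS AND PROOFS =====

theorem pyRange2_nil (a b : Int) (h : b ≤ a) : PySem.List.pyRange a b 2 = [] := by
  rw [PySem.List.pyRange_of_pos a b (by norm_num)]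
  rw [if_neg (by omega)]
  rfl

theorem pyRange2_cons (a b : Int) (h : a < b) :
    PySem.List.pyRange a b 2 = a :: PySem.List.pyRange (a + 2) b 2 := by
  rw [PySem.List.pyRange_of_pos a b (by norm_num),
      PySem.List.pyRange_of_pos (a + 2) b (by norm_num)]
  rw [if_pos h]
  have hc : ((b - a + 2 - 1) / 2).toNat =
      (if a + 2 < b then ((b - (a + 2) + 2 - 1) / 2).toNat else 0) + 1 := by
    split_ifs with h2 <;> omega
  rw [hc, List.range_succ_eq_map, List.map_cons, List.map_map]
  congr 1
  · norm_num
  · congr 1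
    funext k
    simp only [Function.comp_apply, Nat.succ_eq_add_one]
    push_cast
    ring

-- Past 13 the guard num**2 < 200 never fires again, so the loop yields nothing.
theorem iteratorWithYieldLoopA_dead (n num num_sum : Int) (h : 15 ≤ num) :
    iteratorWithYieldLoopA n num num_sum = [] := by
  rw [iteratorWithYieldLoopA]
  by_cases hle : num ≤ n
  · rw [if_pos hle, if_neg (by nlinarith)]
    exact iteratorWithYieldLoopA_dead n (num + 2) num_sum (by omega)
  · rw [if_neg hle]
termination_by (n + 1 - num).toNat
decreasing_by omega

-- Loop invariant: at an odd num with num_sum = ((num-1)/2)^2, the rest of A's loop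
-- is exactly B's closed-form list starting at num.
theorem iteratorWithYieldLoopA_inv (n num s : Int) (h1 : 1 ≤ num) (h2 : num % 2 = 1)
    (hs : s = ((num - 1) / 2) ^ 2) :
    iteratorWithYieldLoopA n num s =
      (PySem.List.pyRange num ((if n < 13 then n else 13) + 1) 2).map
        (fun m => (m, (PySem.Int.floordiv (m + 1) 2) ^ 2)) := by
  obtain ⟨k, hk⟩ : ∃ k : Int, num = 2 * k + 1 := ⟨(num - 1) / 2, by omega⟩
  rw [iteratorWithYieldLoopA]
  by_cases hle : num ≤ n
  · by_cases hsq : num ^ 2 < 200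
    · have hnum13 : num ≤ 13 := by
        by_contra hcon
        have h15 : 15 ≤ num := by omega
        nlinarith [sq_nonneg (num - 15)]
      rw [if_pos hle, if_pos hsq]
      rw [pyRange2_cons num _ (by split_ifs <;> omega), List.map_cons]
      have hsum : s + num = ((num + 1) / 2) ^ 2 := by
        have e1 : (num - 1) / 2 = k := by omega
        have e2 : (num + 1) / 2 = k + 1 := by omega
        rw [hs, e1, e2, hk]; ring
      rw [iteratorWithYieldLoopA_inv n (num + 2) (s + num) (by omega) (by omega)
            (by rw [hsum]; congr 1; omega)]
      congr 1
      rw [PySem.Int.floordiv_eq_ediv_of_pos (by norm_num), hsum]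
    · have h15 : 15 ≤ num := by
        by_contra hcon
        have h13 : num ≤ 13 := by omega
        exact hsq (by nlinarith [mul_nonneg (by omega : (0:Int) ≤ 13 - num) (by omega : (0:Int) ≤ 13 + num)])
      rw [if_pos hle, if_neg hsq, iteratorWithYieldLoopA_dead n (num + 2) s (by omega)]
      rw [pyRange2_nil _ _ (by split_ifs <;> omega), List.map_nil]
  · rw [if_neg hle, pyRange2_nil _ _ (by split_ifs <;> omega), List.map_nil]
termination_by (n + 1 - num).toNat
decreasing_by all_goals omega

-- ===== VERDICT (by name: the statement is the Claim_ definition above) =====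
theorem iterator_with_yield_spec : Claim_equal_iterator_with_yield := by
  intro n _
  unfold Spec_iterator_with_yield iterator_with_yield iterator_with_yield_alt
  exact iteratorWithYieldLoopA_inv n 1 0 (by norm_num) (by norm_num) (by norm_num)
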